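-- pv_equiv track=rewrite | github.com/ivamorgra/E1-ASC | algcf6.py | t_nearest
-- ===== SOURCE A (Python) =====
-- def get_index(lista,valor):
--     for i in range(0,len(lista)):
--         if lista[i] == valor:
--             return i
--     return -1
--
-- def t_nearest(distancias,t):
--     "Cálculo de los T vectores más cercanos"
--     res = []
--     for subproblema in distancias:
--         vectores = []
--         for i in range(0,t):
--             minimo = min(subproblema)
--             indice = get_index(subproblema,minimo)
--             vectores.append(indice)
--             subproblema[indice] = 1000000
--         res.append(vectores)
--     return res
-- ===== SOURCE B (Python) =====
-- def t_nearest(distancias, t):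
--     "Cálculo de los T vectores más cercanos"
--     k = max(t, 0)
--     return [sorted(range(len(sub)), key=lambda i: sub[i])[:k]
--             for sub in distancias]
-- ===== Notes on version B (the rewrite author's own statement) =====
-- stated objective: simpler
-- what changed: A runs t destructive rounds per sublist (full min() scan, linear first-index search, overwrite with the in-band sentinel 1000000); B just stable-sorts each sublist's indices by value and takes the first t, no mutation and no rescans. Pre_ excludes inputs where A raises (an empty sublist with t >= 1) and inputs where A's returned value is an artefact of that sentinel encoding: a distance >= 1000000 collides with the overwrite marker, and t larger than a sublist's length makes A pad with a repeated marker index.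
-- outside the precondition, e.g. on t_nearest([[2000000, 5]], 2): A returns [[1, 1]], B returns [[1, 0]]; on t_nearest([[3]], 2): A returns [[0, 0]], B returns [[0]]
-- crash fix: On inputs with t >= 1 and an empty sublist A raises ValueError (min of empty list); B returns the empty pick list for that sublist. — e.g. on t_nearest([[]], 1): A raises ValueError, B returns [[]]
import Mathlib
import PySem

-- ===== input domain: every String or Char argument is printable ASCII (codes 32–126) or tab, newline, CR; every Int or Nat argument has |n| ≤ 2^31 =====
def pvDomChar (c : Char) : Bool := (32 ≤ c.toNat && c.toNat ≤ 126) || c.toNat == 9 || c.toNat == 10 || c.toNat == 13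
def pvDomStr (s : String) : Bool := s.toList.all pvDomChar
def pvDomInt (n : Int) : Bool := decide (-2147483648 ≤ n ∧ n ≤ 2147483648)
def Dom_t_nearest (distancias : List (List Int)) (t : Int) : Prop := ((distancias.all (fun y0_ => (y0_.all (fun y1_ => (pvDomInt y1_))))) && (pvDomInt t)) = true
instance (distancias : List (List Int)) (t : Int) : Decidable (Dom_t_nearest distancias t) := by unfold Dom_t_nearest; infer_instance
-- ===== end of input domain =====

-- B replaces A's t destructive rounds per sublist (min scan + first-index scan + in-place
-- 1000000-sentinel overwrite) by one stable sort of each sublist's indices by value, taking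
-- the first t; objective: simpler. Python A overwrites the inner lists of `distancias` in
-- place; B does not: the equivalence proved here is about the RETURN value only.

-- ===== PORT A =====
-- get_index: scan with a running counter i, first match returns i, else -1
def getIndexAux : List Int → Int → Int → Int
  | [], _, _ => -1
  | x :: xs, valor, i => if x = valor then i else getIndexAux xs valor (i + 1)

def get_index (lista : List Int) (valor : Int) : Int := getIndexAux lista valor 0

-- one iteration of A's inner `for i in range(0,t)` loop; state = (subproblema, vectores).
-- Python raises ValueError on min([]) — there the PySem primitive is none and we leave the
-- state unchanged (such inputs are outside Pre_).
def tStep (st : List Int × List Int) (_i : Int) : List Int × List Int :=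
  match PySem.List.min? st.1 (fun x => x) with
  | none => st
  | some minimo =>
      let indice := get_index st.1 minimo
      (st.1.set indice.toNat 1000000, st.2 ++ [indice])

def t_nearest (distancias : List (List Int)) (t : Int) : List (List Int) :=
  distancias.foldl
    (fun res subproblema =>
      res ++ [((PySem.List.pyRange 0 t 1).foldl tStep (subproblema, [])).2])
    []

-- ===== PORT B =====
-- Source B: k = max(t, 0); one list comprehension, per sublist a stable sort of the indices
-- by value, sliced to the first k
def t_nearest_alt (distancias : List (List Int)) (t : Int) : List (List Int) :=
  let k := max t 0
  distancias.map (fun sub =>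
    PySem.List.slice
      (PySem.List.sorted (PySem.List.pyRange 0 (PySem.List.len sub) 1)
        (fun i => PySem.List.pyGetD sub i 0))
      none (some k))

-- ===== PRECONDITION & SPEC =====
-- Pre_ excludes inputs where A raises (an empty sublist with t ≥ 1: min([]) is ValueError)
-- and inputs on which A still returns but its value is an artefact of the in-band sentinel:
-- a distance ≥ 1000000 collides with the 1000000 overwrite marker, and t larger than a
-- sublist's length makes A pad the picks with a repeated marker index.
def Pre_t_nearest (distancias : List (List Int)) (t : Int) : Prop :=
  t ≤ 0 ∨ ∀ sub ∈ distancias, (∀ v ∈ sub, v < 1000000) ∧ t ≤ (sub.length : Int)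
instance (distancias : List (List Int)) (t : Int) : Decidable (Pre_t_nearest distancias t) := by
  unfold Pre_t_nearest; infer_instance

def pvWitness_t_nearest : List (List Int) × Int := ([[3, 1, 2], [7, 7, 0]], 2)

-- On inputs with t ≥ 1 and an empty sublist A raises ValueError (min of the empty list);
-- B returns the empty pick list for that sublist.
def Raises_t_nearest (distancias : List (List Int)) (t : Int) : Prop :=
  1 ≤ t ∧ [] ∈ distancias
instance (distancias : List (List Int)) (t : Int) : Decidable (Raises_t_nearest distancias t) := by
  unfold Raises_t_nearest; infer_instance

def pvRaiseWitness_t_nearest : List (List Int) × Int := ([[]], 1)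
def pvRaiseWitnessOut_t_nearest : List (List Int) := [[]]

def Spec_t_nearest (distancias : List (List Int)) (t : Int) (out : List (List Int)) : Prop := out = t_nearest_alt distancias t
instance (distancias : List (List Int)) (t : Int) (out : List (List Int)) : Decidable (Spec_t_nearest distancias t out) := by unfold Spec_t_nearest; infer_instance

-- ===== CLAIM (what is proved, stated in full; the proofs are below) =====
def Claim_equal_t_nearest : Prop := ∀ (distancias : List (List Int)) (t : Int), Dom_t_nearest distancias t → Pre_t_nearest distancias t → Spec_t_nearest distancias t (t_nearest distancias t)

def Claim_raises_t_nearest : Prop := (∀ (distancias : List (List Int)) (t : Int), Dom_t_nearest distancias t → Raises_t_nearest distancias t → ¬ Pre_t_nearest distancias t) ∧ (Dom_t_nearest (pvRaiseWitness_t_nearest.1) (pvRaiseWitness_t_nearest.2) ∧ Raises_t_nearest (pvRaiseWitness_t_nearest.1) (pvRaiseWitness_t_nearest.2) ∧ t_nearest_alt (pvRaiseWitness_t_nearest.1) (pvRaiseWitness_t_nearest.2) = pvRaiseWitnessOut_t_nearest)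

-- ===== LEMMAS AND PROOFS =====

-- strict lexicographic (value, index) order used to characterise the stable sort
def lexlt (key : Int → Int) (a b : Int) : Prop := key a < key b ∨ (key a = key b ∧ a < b)

-- the masked sublist after A has picked the indices in `done`
def maskL (sub : List Int) (done : List Int) : List Int :=
  done.foldl (fun s j => s.set j.toNat 1000000) sub

theorem maskL_nil (sub : List Int) : maskL sub [] = sub := rfl

theorem maskL_cons (sub : List Int) (d : Int) (ds : List Int) :
    maskL sub (d :: ds) = maskL (sub.set d.toNat 1000000) ds := rfl

theorem maskL_concat (sub : List Int) (done : List Int) (r : Int) :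
    maskL sub (done ++ [r]) = (maskL sub done).set r.toNat 1000000 := by
  simp [maskL]

theorem maskL_length (done : List Int) : ∀ (sub : List Int),
    (maskL sub done).length = sub.length := by
  induction done with
  | nil => intro sub; rfl
  | cons d ds ih => intro sub; rw [maskL_cons, ih]; simp

theorem maskL_get? (done : List Int) : ∀ (sub : List Int) (j : Nat) (hj : j < sub.length),
    (∀ d ∈ done, 0 ≤ d) →
    (maskL sub done)[j]? = some (if (j : Int) ∈ done then 1000000 else sub[j]) := by
  induction done with
  | nil => intro sub j hj _; simp [maskL_nil, List.getElem?_eq_getElem hj]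
  | cons d ds ih =>
      intro sub j hj hd
      rw [maskL_cons, ih (sub.set d.toNat 1000000) j (by simpa using hj)
        (fun x hx => hd x (List.mem_cons_of_mem _ hx))]
      by_cases hds : (j : Int) ∈ ds
      · simp [hds]
      · have h0d : 0 ≤ d := hd d (List.mem_cons_self ..)
        by_cases hjd : (j : Int) = d
        · have : d.toNat = j := by omega
          simp [hjd, this]
        · have : ¬ d.toNat = j := by omega
          simp [hds, hjd, this]

theorem getIndexAux_spec (v : Int) : ∀ (lst : List Int) (j : Nat) (c : Int)
    (hj : j < lst.length), lst[j] = v → (∀ i (hi : i < j), lst[i]'(by omega) ≠ v) →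
    getIndexAux lst v c = c + j := by
  intro lst
  induction lst with
  | nil => intro j c hj; simp at hj
  | cons x xs ih =>
      intro j c hj hv hfirst
      cases j with
      | zero => simp at hv; simp [getIndexAux, hv]
      | succ k =>
          have hx : x ≠ v := by
            have := hfirst 0 (Nat.succ_pos k); simpa using this
          rw [getIndexAux, if_neg hx, ih k (c + 1) (by simpa using hj) (by simpa using hv)
            (fun i hi => by have := hfirst (i + 1) (by omega); simpa using this)]
          omega

theorem min?_eq_of (lst : List Int) (m : Int) (hm : m ∈ lst) (hmin : ∀ y ∈ lst, m ≤ y) :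
    PySem.List.min? lst (fun x => x) = some m := by
  cases h : PySem.List.min? lst (fun x => x) with
  | none =>
      rw [PySem.List.min?_eq_none_iff] at h
      subst h; simp at hm
  | some m' =>
      have h1 : m' ∈ lst := PySem.List.min?_mem h
      have h2 : m' ≤ m := PySem.List.min?_isMin h m hm
      have h3 : m ≤ m' := hmin m' h1
      have : m' = m := le_antisymm h2 h3
      rw [this]

theorem insertBy_lex (key : Int → Int) (x : Int) : ∀ (acc : List Int),
    acc.Pairwise (lexlt key) → (∀ y ∈ acc, y < x) →
    (PySem.List.insertBy (fun a b => decide (key a < key b)) x acc).Pairwise (lexlt key) := by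
  intro acc
  induction acc with
  | nil => intro _ _; simp [PySem.List.insertBy]
  | cons y ys ih =>
      intro hp hlt
      rw [List.pairwise_cons] at hp
      rw [PySem.List.insertBy]
      by_cases hxy : key x < key y
      · simp only [hxy, decide_true, if_true]
        refine List.pairwise_cons.2 ⟨?_, List.pairwise_cons.2 ⟨hp.1, hp.2⟩⟩
        intro z hz
        rw [List.mem_cons] at hz
        rcases hz with rfl | hz
        · exact Or.inl hxy
        · left
          rcases hp.1 z hz with h | h
          · omega
          · omega
      · simp only [hxy, decide_false]
        refine List.pairwise_cons.2 ⟨?_, ih hp.2 (fun z hz => hlt z (List.mem_cons_of_mem _ hz))⟩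
        intro z hz
        rw [PySem.List.mem_insertBy] at hz
        rcases hz with rfl | hz
        · rcases lt_or_ge (key y) (key z) with h | h
          · exact Or.inl h
          · exact Or.inr ⟨by omega, hlt y (List.mem_cons_self ..)⟩
        · exact hp.1 z hz

theorem foldl_insertBy_lex (key : Int → Int) : ∀ (xs acc : List Int),
    xs.Pairwise (· < ·) → acc.Pairwise (lexlt key) → (∀ a ∈ acc, ∀ x ∈ xs, a < x) →
    (xs.foldl (fun acc x => PySem.List.insertBy (fun a b => decide (key a < key b)) x acc)
      acc).Pairwise (lexlt key) := by
  intro xs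
  induction xs with
  | nil => intro acc _ hacc _; simpa using hacc
  | cons x xs ih =>
      intro acc hxs hacc hcross
      rw [List.pairwise_cons] at hxs
      rw [List.foldl_cons]
      refine ih _ hxs.2 (insertBy_lex key x acc hacc
        (fun y hy => hcross y hy x (List.mem_cons_self ..))) ?_
      intro a ha z hz
      rw [PySem.List.mem_insertBy] at ha
      rcases ha with rfl | ha
      · exact hxs.1 z hz
      · exact hcross a ha z (List.mem_cons_of_mem _ hz)

theorem sorted_lex (key : Int → Int) (xs : List Int) (hxs : xs.Pairwise (· < ·)) :
    (PySem.List.sorted xs key).Pairwise (lexlt key) := by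
  have h : PySem.List.sorted xs key =
      xs.foldl (fun acc x => PySem.List.insertBy (fun a b => decide (key a < key b)) x acc) [] :=
    PySem.List.sorted_eq_foldl_insertBy xs key
  rw [h]
  exact foldl_insertBy_lex key xs [] hxs (by simp) (by simp)

theorem foldl_tStep_iterate : ∀ (l : List Int) (init : List Int × List Int),
    l.foldl tStep init = (fun s => tStep s 0)^[l.length] init := by
  intro l
  induction l with
  | nil => intro init; rfl
  | cons x xs ih =>
      intro init
      rw [List.foldl_cons, ih (tStep init x), List.length_cons, Function.iterate_succ_apply]
      rfl

theorem key_eq (sub : List Int) (j : Nat) (hj : j < sub.length) :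
    PySem.List.pyGetD sub (j : Int) 0 = sub[j] := by
  rw [PySem.List.pyGetD_eq_getElem sub 0 (by omega) (by omega)]
  simp

theorem tStep_step (sub σ : List Int) (done : List Int) (r : Int) (rs : List Int)
    (hperm : σ.Perm ((PySem.List.pyRange 0 (sub.length : Int) 1).filter
      (fun j => decide (PySem.List.pyGetD sub j 0 < 1000000))))
    (hpair : σ.Pairwise (lexlt (fun j => PySem.List.pyGetD sub j 0)))
    (hσ : σ = done ++ r :: rs) (vec : List Int) (i : Int) :
    tStep (maskL sub done, vec) i = (maskL sub (done ++ [r]), vec ++ [r]) := by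
  have hmemσ : ∀ x : Int, x ∈ σ ↔
      (0 ≤ x ∧ x < (sub.length : Int)) ∧ PySem.List.pyGetD sub x 0 < 1000000 := by
    intro x
    rw [hperm.mem_iff, List.mem_filter, PySem.List.mem_pyRange_one, decide_eq_true_eq]
  have hnod : σ.Nodup :=
    hperm.nodup_iff.2 ((PySem.List.nodup_pyRange_one _ _).filter _)
  have hrσ : r ∈ σ := by rw [hσ]; exact List.mem_append_right _ (List.mem_cons_self ..)
  have hr0 : 0 ≤ r := ((hmemσ r).1 hrσ).1.1
  have hrn : r < (sub.length : Int) := ((hmemσ r).1 hrσ).1.2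
  have hR : r.toNat < sub.length := by omega
  have hRr : (r.toNat : Int) = r := Int.toNat_of_nonneg hr0
  have hdone0 : ∀ d ∈ done, 0 ≤ d := by
    intro d hd
    exact ((hmemσ d).1 (by rw [hσ]; exact List.mem_append_left _ hd)).1.1
  have hrdone : r ∉ done := by
    intro hrd
    have hn := hnod
    rw [hσ] at hn
    exact (List.disjoint_of_nodup_append hn) hrd (List.mem_cons_self ..)
  have hpairRest : ∀ z ∈ rs, lexlt (fun j => PySem.List.pyGetD sub j 0) r z := by
    have hp := hpair
    rw [hσ, List.pairwise_append] at hp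
    exact (List.pairwise_cons.1 hp.2.1).1
  have hkey : ∀ (j : Nat) (hj : j < sub.length), PySem.List.pyGetD sub (j : Int) 0 = sub[j] := by
    intro j hj
    rw [PySem.List.pyGetD_eq_getElem sub 0 (by omega) (by omega)]
    simp
  set m : Int := sub[r.toNat]'hR with hmdef
  have hkeyr : PySem.List.pyGetD sub r 0 = m := by rw [← hRr, hkey r.toNat hR]
  have hmM : m < 1000000 := by
    have := ((hmemσ r).1 hrσ).2
    rwa [hkeyr] at this
  have hget : ∀ (j : Nat) (hj : j < sub.length),
      (maskL sub done)[j]? = some (if (j : Int) ∈ done then 1000000 else sub[j]) :=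
    fun j hj => maskL_get? done sub j hj hdone0
  -- the value at a non-picked position j ≠ r is lex-greater than at r
  have hval : ∀ (j : Nat) (hj : j < sub.length), ¬ ((j : Int) ∈ done) → (j : Int) ≠ r →
      m < sub[j] ∨ (m = sub[j] ∧ r < (j : Int)) := by
    intro j hj hjd hjr
    by_cases hjσ : (j : Int) ∈ σ
    · have hjin := hjσ
      rw [hσ, List.mem_append, List.mem_cons] at hjin
      rcases hjin with h | h | h
      · exact absurd h hjd
      · exact absurd h hjr
      · rcases hpairRest _ h with h' | h'
        · left
          simp only at h'
          rwa [hkeyr, hkey j hj] at h'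
        · right
          obtain ⟨h1, h2⟩ := h'
          simp only at h1
          rw [hkeyr, hkey j hj] at h1
          exact ⟨h1, h2⟩
    · left
      have hbig : ¬ PySem.List.pyGetD sub (j : Int) 0 < 1000000 := by
        intro hlt
        exact hjσ ((hmemσ _).2 ⟨⟨by omega, by omega⟩, hlt⟩)
      rw [hkey j hj] at hbig
      omega
  -- the minimum of the masked list is m
  have hminval : PySem.List.min? (maskL sub done) (fun x => x) = some m := by
    apply min?_eq_of
    · rw [List.mem_iff_getElem?]
      exact ⟨r.toNat, by rw [hget r.toNat hR, if_neg (by rw [hRr]; exact hrdone)]⟩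
    · intro y hy
      obtain ⟨j, hj⟩ := List.mem_iff_getElem?.1 hy
      have hjlen : j < (maskL sub done).length := (List.getElem?_eq_some_iff.1 hj).1
      rw [maskL_length] at hjlen
      rw [hget j hjlen] at hj
      have hy' : y = if (j : Int) ∈ done then 1000000 else sub[j] := by
        injection hj with h; omega
      by_cases hjd : (j : Int) ∈ done
      · rw [hy', if_pos hjd]; omega
      · rw [hy', if_neg hjd]
        by_cases hjr : (j : Int) = r
        · have hjR : j = r.toNat := by omega
          subst hjR; omega
        · rcases hval j hjlen hjd hjr with h | h
          · omega
          · omega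
  -- r is the first index of that minimum in the masked list
  have hidx : getIndexAux (maskL sub done) m 0 = (0 : Int) + r.toNat := by
    refine getIndexAux_spec m (maskL sub done) r.toNat 0
      (by rw [maskL_length]; exact hR) ?_ ?_
    · have h := hget r.toNat hR
      rw [if_neg (by rw [hRr]; exact hrdone)] at h
      exact (List.getElem?_eq_some_iff.1 h).2
    · intro j hjR
      have hjlen : j < sub.length := by omega
      have h := hget j hjlen
      rw [(List.getElem?_eq_some_iff.1 h).2]
      by_cases hjd : (j : Int) ∈ done
      · rw [if_pos hjd]; omega
      · rw [if_neg hjd]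
        have hjr : (j : Int) ≠ r := by omega
        rcases hval j hjlen hjd hjr with h' | h'
        · omega
        · omega
  -- put the step together
  rw [tStep]
  simp only [hminval]
  rw [get_index, hidx, maskL_concat]
  rw [show ((0 : Int) + (r.toNat : Int)).toNat = r.toNat by omega,
    show (0 : Int) + (r.toNat : Int) = r by omega]

theorem sim (sub σ : List Int)
    (hperm : σ.Perm ((PySem.List.pyRange 0 (sub.length : Int) 1).filter
      (fun j => decide (PySem.List.pyGetD sub j 0 < 1000000))))
    (hpair : σ.Pairwise (lexlt (fun j => PySem.List.pyGetD sub j 0))) :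
    ∀ (k : Nat) (done rest vec : List Int), σ = done ++ rest → k ≤ rest.length →
    (fun s => tStep s 0)^[k] (maskL sub done, vec) =
      (maskL sub (done ++ rest.take k), vec ++ rest.take k) := by
  intro k
  induction k with
  | zero => intro done rest vec hσ hk; simp
  | succ k ih =>
      intro done rest vec hσ hk
      cases rest with
      | nil => simp at hk
      | cons r rs =>
          rw [Function.iterate_succ_apply]
          show (fun s => tStep s 0)^[k] (tStep (maskL sub done, vec) 0) = _
          rw [tStep_step sub σ done r rs hperm hpair hσ vec 0]
          rw [ih (done ++ [r]) rs (vec ++ [r]) (by rw [hσ]; simp) (by simpa using hk)]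
          simp

theorem per_sub (sub : List Int) (t : Int)
    (hok : t ≤ 0 ∨ ((∀ v ∈ sub, v < 1000000) ∧ t ≤ (sub.length : Int))) :
    ((PySem.List.pyRange 0 t 1).foldl tStep (sub, ([] : List Int))).2 =
      PySem.List.slice
        (PySem.List.sorted (PySem.List.pyRange 0 (PySem.List.len sub) 1)
          (fun i => PySem.List.pyGetD sub i 0))
        none (some (max t 0)) := by
  have hlen : PySem.List.len sub = (sub.length : Int) := by simp
  by_cases ht0 : t ≤ 0
  · rw [PySem.List.pyRange_one_eq_nil ht0,
      show max t 0 = 0 by omega, PySem.List.slice_to _ (by omega)]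
    simp
  obtain ⟨hall, htlen⟩ : (∀ v ∈ sub, v < 1000000) ∧ t ≤ (sub.length : Int) := by
    rcases hok with h | h
    · omega
    · exact h
  rw [hlen]
  set σ : List Int := PySem.List.sorted (PySem.List.pyRange 0 (sub.length : Int) 1)
    (fun i => PySem.List.pyGetD sub i 0) with hσdef
  have hfilter : (PySem.List.pyRange 0 (sub.length : Int) 1).filter
      (fun j => decide (PySem.List.pyGetD sub j 0 < 1000000)) =
      PySem.List.pyRange 0 (sub.length : Int) 1 := by
    apply List.filter_eq_self.2
    intro j hj
    have hb := PySem.List.mem_pyRange_one.1 hj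
    have hjN : j.toNat < sub.length := by omega
    have hjc : ((j.toNat : Nat) : Int) = j := by omega
    rw [decide_eq_true_eq, ← hjc, key_eq sub j.toNat hjN]
    exact hall _ (List.getElem_mem hjN)
  have hperm : σ.Perm ((PySem.List.pyRange 0 (sub.length : Int) 1).filter
      (fun j => decide (PySem.List.pyGetD sub j 0 < 1000000))) := by
    rw [hfilter]
    exact PySem.List.sorted_perm _ _ _
  have hpair : σ.Pairwise (lexlt (fun j => PySem.List.pyGetD sub j 0)) :=
    sorted_lex _ _ (PySem.List.pairwise_lt_pyRange_one _ _)
  have hσlen : σ.length = sub.length := by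
    have := hperm.length_eq
    rwa [hfilter, PySem.List.length_pyRange_one, show ((sub.length : Int) - 0).toNat = sub.length by omega] at this
  have hsim := sim sub σ hperm hpair t.toNat [] σ [] (by simp) (by omega)
  rw [maskL_nil] at hsim
  rw [foldl_tStep_iterate,
    show (PySem.List.pyRange 0 t 1).length = t.toNat by
      rw [PySem.List.length_pyRange_one]; omega,
    hsim, show max t 0 = t by omega, PySem.List.slice_to _ (by omega)]
  simp

theorem foldl_append_map {α β : Type} (f : α → β) : ∀ (l : List α) (acc : List β),
    l.foldl (fun res x => res ++ [f x]) acc = acc ++ l.map f := by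
  intro l
  induction l with
  | nil => intro acc; simp
  | cons x xs ih => intro acc; simp [List.foldl_cons, ih]

-- ===== VERDICT (by name: the statements are the Claim_ definitions above) =====
theorem t_nearest_spec : Claim_equal_t_nearest := by
  intro distancias t _ hpre
  show t_nearest distancias t = t_nearest_alt distancias t
  rw [t_nearest, t_nearest_alt, foldl_append_map]
  simp only [List.nil_append]
  apply List.map_congr_left
  intro sub hsub
  refine per_sub sub t ?_
  rcases hpre with h | h
  · exact Or.inl h
  · exact Or.inr (h sub hsub)

theorem t_nearest_raises : Claim_raises_t_nearest := by
  unfold Claim_raises_t_nearest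
  refine ⟨?_, by decide⟩
  intro distancias t _ hr hpre
  obtain ⟨ht, hmem⟩ := hr
  rcases hpre with h | h
  · omega
  · have := (h [] hmem).2
    simp at this
    omega

-- sanity check, a projection of t_nearest_raises: the raise witness really lies in Raises_
theorem pvRaiseWitness_ok : Raises_t_nearest (pvRaiseWitness_t_nearest.1) (pvRaiseWitness_t_nearest.2) :=
  t_nearest_raises.2.2.1
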